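-- pv_equiv track=rewrite | github.com/rajkar86/python_coding_interviews | leetcode/0805_split_array_with_same_average.py | splitArraySameAverage
-- ===== SOURCE A (Python) =====
-- A = [5,3,11,19,2]
--
-- def splitArraySameAverage(A):
--
--   N = len(A)
--   S = sum(A)
--   M = N//2 + 1
--   # The smaller partition is utmost M
--
--   target = {} # smaller partition size -> required total for that size
--   for i in range(1,M):
--     if (S * i) % N == 0:
--       target[i] = (S*i)//N
--
--   if len(target) == 0:
--     return False
--
--
--   ## mat i shows how many sums can be create with n numbers
--   mat = [set() for i in range(M)]
--   mat[0].add(0)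
--
--   for i, num in enumerate(A):
--     for k in reversed(range(1,min(i+2,M))):  # reversed is important
--       mat[k].update([i + num for i in mat[k-1]])
--       if k in target and target[k] in mat[k]:
--         return True
--
--   return False
-- ===== SOURCE B (Python) =====
-- def splitArraySameAverage(A):
--     # Meet in the middle: enumerate the (size, sum) profiles of all subsets of
--     # each half independently, then join the two tables against the required
--     # (size, size*S/N) targets -- instead of A's single size-layered DP sweep.
--     N = len(A)
--     S = sum(A)
--     half = N // 2
--     targets = [(k, S * k // N) for k in range(1, half + 1) if S * k % N == 0]
--     if not targets:
--         return False
--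
--     def subset_profiles(xs):
--         pairs = {(0, 0)}
--         for x in xs:
--             pairs |= {(k + 1, s + x) for (k, s) in pairs}
--         return pairs
--
--     left = subset_profiles(A[:half])
--     right = subset_profiles(A[half:])
--     return any(k1 <= k and (k - k1, t - s1) in right
--                for (k, t) in targets for (k1, s1) in left)
-- ===== Notes on version B (the rewrite author's own statement) =====
-- stated objective: alternative
-- what changed: A's single size-layered subset-sum DP over the whole list (per-size sum-sets updated in reverse with an early return) is replaced by meet-in-the-middle: the (size,sum) profiles of all subsets of each half of the list are enumerated independently and the two tables are joined against the required (size, size*S/N) targets.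
import Mathlib
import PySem

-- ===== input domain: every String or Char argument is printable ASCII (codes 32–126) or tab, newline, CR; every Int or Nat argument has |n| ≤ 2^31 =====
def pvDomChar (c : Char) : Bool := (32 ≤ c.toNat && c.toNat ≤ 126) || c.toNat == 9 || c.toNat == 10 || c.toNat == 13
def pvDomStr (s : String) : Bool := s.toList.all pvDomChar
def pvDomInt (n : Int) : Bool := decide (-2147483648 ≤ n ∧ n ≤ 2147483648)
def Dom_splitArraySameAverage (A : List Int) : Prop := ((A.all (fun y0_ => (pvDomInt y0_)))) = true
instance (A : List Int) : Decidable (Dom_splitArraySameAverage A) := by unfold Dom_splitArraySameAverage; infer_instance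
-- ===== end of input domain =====

-- B replaces A's size-layered subset-sum DP (reversed in-place update, early return)
-- by meet-in-the-middle: enumerate the (size, sum) profiles of each half of the
-- list independently and join the two tables against the required targets
-- (objective: alternative algorithm).

-- ===== PORT A =====
-- mat[k].update([i + num for i in mat[k-1]])  (a Set built from a Set: order-independent, exact)
def pvUpdA (num : Int) (k : Nat) (mat : List (PySem.Set Int)) : List (PySem.Set Int) :=
  mat.set k (PySem.Set.update (mat.getD k []) ((mat.getD (k - 1) []).map (fun s => s + num)))

-- inner loop 'for k in reversed(range(1, min(i+2, M)))' with its 'return True'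
def pvInnerA (target : PySem.Dict Nat Int) (num : Int) :
    List (PySem.Set Int) → List Nat → List (PySem.Set Int) × Bool
  | mat, [] => (mat, false)
  | mat, k :: ks =>
    let mat' := pvUpdA num k mat
    if (match target.get? k with
        | some t => PySem.Set.contains (mat'.getD k []) t
        | none => false) then (mat', true)
    else pvInnerA target num mat' ks

-- outer loop 'for i, num in enumerate(A)'
def pvOuterA (target : PySem.Dict Nat Int) (M : Nat) :
    List (PySem.Set Int) → Nat → List Int → Bool
  | _, _, [] => false
  | mat, i, num :: rest =>
    match pvInnerA target num mat ((List.range' 1 (min (i + 2) M - 1)).reverse) with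
    | (_, true) => true
    | (mat', false) => pvOuterA target M mat' (i + 1) rest

def splitArraySameAverage (A : List Int) : Bool :=
  let N := A.length
  let S := A.sum
  let M := N / 2 + 1
  let target : PySem.Dict Nat Int :=
    (List.range' 1 (M - 1)).foldl
      (fun d (i : Nat) => if PySem.Int.mod (S * (i : Int)) (N : Int) == 0
                  then d.insert i (PySem.Int.floordiv (S * (i : Int)) (N : Int)) else d)
      PySem.Dict.empty
  if target.size == 0 then false
  else
    let mat0 : List (PySem.Set Int) := (List.range M).map (fun _ => ([] : PySem.Set Int))
    let mat1 := mat0.set 0 (PySem.Set.add (mat0.getD 0 []) 0)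
    pvOuterA target M mat1 0 A

-- ===== PORT B =====
-- pairs |= {(k + 1, s + x) for (k, s) in pairs}
def pvGrow (pairs : PySem.Set (Nat × Int)) (x : Int) : PySem.Set (Nat × Int) :=
  PySem.Set.union pairs (PySem.Set.ofList (pairs.map (fun p => (p.1 + 1, p.2 + x))))

-- def subset_profiles(xs): starts from {(0,0)} and folds the loop body over xs
def pvProfiles (xs : List Int) : PySem.Set (Nat × Int) :=
  xs.foldl pvGrow (PySem.Set.ofList [((0 : Nat), (0 : Int))])

def splitArraySameAverage_alt (A : List Int) : Bool :=
  let N := A.length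
  let S := A.sum
  let half := N / 2
  let targets : List (Nat × Int) :=
    ((List.range' 1 half).filter (fun (k : Nat) => PySem.Int.mod (S * (k : Int)) (N : Int) == 0)).map
      (fun (k : Nat) => (k, PySem.Int.floordiv (S * (k : Int)) (N : Int)))
  if targets = [] then false
  else
    let left := pvProfiles (PySem.List.slice A none (some (half : Int)))
    let right := pvProfiles (PySem.List.slice A (some (half : Int)) none)
    targets.any (fun p => left.any (fun q =>
      decide (q.1 ≤ p.1) && PySem.Set.contains right (p.1 - q.1, p.2 - q.2)))

-- ===== PRECONDITION & SPEC =====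
def Spec_splitArraySameAverage (A : List Int) (out : Bool) : Prop := out = splitArraySameAverage_alt A
instance (A : List Int) (out : Bool) : Decidable (Spec_splitArraySameAverage A out) := by unfold Spec_splitArraySameAverage; infer_instance

-- ===== CLAIM (what is proved, stated in full; the proofs are below) =====
def Claim_equal_splitArraySameAverage : Prop := ∀ (A : List Int), Dom_splitArraySameAverage A → Spec_splitArraySameAverage A (splitArraySameAverage A)

-- ===== LEMMAS AND PROOFS =====

-- ---- A-side: the layered DP equals a single fold of a capped (size,sum) step ----
def pvStepB (M : Nat) (pairs : PySem.Set (Nat × Int)) (num : Int) : PySem.Set (Nat × Int) :=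
  PySem.Set.union pairs
    (PySem.Set.ofList ((pairs.filter (fun p => p.1 < M)).map (fun p => (p.1 + 1, p.2 + num))))

theorem pv_fold_cond_insert_get? (cond : Nat → Bool) (v : Nat → Int) :
    ∀ (l : List Nat) (d : PySem.Dict Nat Int) (k : Nat),
      (l.foldl (fun d (i : Nat) => if cond i then d.insert i (v i) else d) d).get? k
        = if k ∈ l ∧ cond k = true then some (v k) else d.get? k := by
  intro l
  induction l with
  | nil => intro d k; simp
  | cons a l ih =>
    intro d k
    simp only [List.foldl_cons, ih]
    by_cases hmem : k ∈ l ∧ cond k = true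
    · simp [hmem, List.mem_cons]
    · by_cases hka : k = a
      · subst hka
        by_cases hc : cond k = true
        · simp [hc, PySem.Dict.get?_insert_self]
        · simp [hc]
      · by_cases hc : cond a = true
        · simp [hc, PySem.Dict.get?_insert_of_ne (hne := hka), hmem, List.mem_cons, hka]
        · simp [hc, hmem, List.mem_cons, hka]

def pvUpdTo (num : Int) : Nat → List (PySem.Set Int) → List (PySem.Set Int)
  | 0, mat => mat
  | n + 1, mat => pvUpdTo num n (pvUpdA num (n + 1) mat)

theorem pvUpdA_length (num : Int) (k : Nat) (mat : List (PySem.Set Int)) :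
    (pvUpdA num k mat).length = mat.length := by
  simp [pvUpdA]

theorem pvUpdTo_length (num : Int) : ∀ n mat, (pvUpdTo num n mat).length = mat.length := by
  intro n
  induction n with
  | zero => intro mat; rfl
  | succ n ih => intro mat; simp [pvUpdTo, ih, pvUpdA_length]

theorem pv_getD_set (k j : Nat) (v : PySem.Set Int) (mat : List (PySem.Set Int)) :
    (mat.set k v).getD j [] = if j = k ∧ k < mat.length then v else mat.getD j [] := by
  simp only [List.getD_eq_getElem?_getD, List.getElem?_set]
  by_cases hk : k = j
  · subst hk
    by_cases hl : k < mat.length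
    · simp [hl]
    · simp [hl]
  · simp [hk, (show ¬(j = k ∧ k < mat.length) from fun h => hk h.1.symm)]

theorem pvUpdTo_getD (num : Int) :
    ∀ (n : Nat) (mat : List (PySem.Set Int)) (j : Nat), n < mat.length →
      (pvUpdTo num n mat).getD j [] =
        if 1 ≤ j ∧ j ≤ n then
          PySem.Set.update (mat.getD j []) ((mat.getD (j - 1) []).map (fun s => s + num))
        else mat.getD j [] := by
  intro n
  induction n with
  | zero => intro mat j h; simp [pvUpdTo]; omega
  | succ n ih =>
    intro mat j h
    have hlen : n < (pvUpdA num (n + 1) mat).length := by rw [pvUpdA_length]; omega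
    have hA : ∀ j', (pvUpdA num (n + 1) mat).getD j' [] =
        if j' = n + 1 then
          PySem.Set.update (mat.getD (n+1) []) ((mat.getD n []).map (fun s => s + num))
        else mat.getD j' [] := by
      intro j'
      rw [pvUpdA, pv_getD_set]
      by_cases hj : j' = n + 1
      · simp [hj, h]
      · simp [hj]
    rw [pvUpdTo, ih _ _ hlen]
    by_cases h1 : 1 ≤ j ∧ j ≤ n
    · rw [if_pos h1, if_pos (by omega)]
      rw [hA, hA, if_neg (by omega), if_neg (by omega)]
    · rw [if_neg h1]
      by_cases h2 : j = n + 1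
      · subst h2
        rw [if_pos (by omega), hA]
        simp
      · rw [if_neg (by omega), hA, if_neg h2]

def pvCheckOK (target : PySem.Dict Nat Int) (k : Nat) (mat : List (PySem.Set Int)) : Prop :=
  ∃ t, target.get? k = some t ∧ t ∈ mat.getD k []

theorem pvInner_spec (target : PySem.Dict Nat Int) (num : Int) :
    ∀ (n : Nat) (mat : List (PySem.Set Int)), n < mat.length →
      (((pvInnerA target num mat ((List.range' 1 n).reverse)).2 = true)
          ↔ ∃ k, 1 ≤ k ∧ k ≤ n ∧ pvCheckOK target k (pvUpdTo num n mat))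
      ∧ ((pvInnerA target num mat ((List.range' 1 n).reverse)).2 = false →
          (pvInnerA target num mat ((List.range' 1 n).reverse)).1 = pvUpdTo num n mat) := by
  intro n
  induction n with
  | zero =>
    intro mat h
    constructor
    · simp only [List.range'_zero, List.reverse_nil, pvInnerA, pvUpdTo]
      constructor
      · intro hx; exact absurd hx (by simp)
      · rintro ⟨k, h1, h2, _⟩; omega
    · intro _; rfl
  | succ n ih =>
    intro mat h
    have hrev : (List.range' 1 (n+1)).reverse = (n+1) :: (List.range' 1 n).reverse := by
      rw [List.range'_concat]; simp [Nat.add_comm]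
    have hlen' : n < (pvUpdA num (n+1) mat).length := by rw [pvUpdA_length]; omega
    have hkey : pvUpdTo num (n+1) mat = pvUpdTo num n (pvUpdA num (n+1) mat) := rfl
    have hget : (pvUpdTo num (n+1) mat).getD (n+1) [] = (pvUpdA num (n+1) mat).getD (n+1) [] := by
      rw [hkey, pvUpdTo_getD num n _ (n+1) hlen', if_neg (by omega)]
    have hc : ((match target.get? (n+1) with
        | some t => PySem.Set.contains ((pvUpdA num (n+1) mat).getD (n+1) []) t
        | none => false) = true) ↔ pvCheckOK target (n+1) (pvUpdTo num (n+1) mat) := by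
      cases hg : target.get? (n+1) with
      | none => simp [pvCheckOK, hg]
      | some t =>
        simp only [pvCheckOK, hg, PySem.Set.contains_iff, ← hget]
        simp
    have hunf : pvInnerA target num mat ((n+1) :: (List.range' 1 n).reverse)
        = if (match target.get? (n+1) with
              | some t => PySem.Set.contains ((pvUpdA num (n+1) mat).getD (n+1) []) t
              | none => false)
          then (pvUpdA num (n+1) mat, true)
          else pvInnerA target num (pvUpdA num (n+1) mat) ((List.range' 1 n).reverse) := rfl
    rw [hrev, hunf]
    cases hcb : (match target.get? (n+1) with
        | some t => PySem.Set.contains ((pvUpdA num (n+1) mat).getD (n+1) []) t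
        | none => false) with
    | true =>
      rw [hcb] at hc
      constructor
      · constructor
        · intro _; exact ⟨n+1, by omega, by omega, hc.mp rfl⟩
        · intro _; simp
      · intro hfalse; simp at hfalse
    | false =>
      rw [hcb] at hc
      simp only [if_false, Bool.false_eq_true]
      have hnot : ¬ pvCheckOK target (n+1) (pvUpdTo num (n+1) mat) := by
        intro hx; exact absurd (hc.mpr hx) (by simp)
      obtain ⟨ih1, ih2⟩ := ih (pvUpdA num (n+1) mat) hlen'
      constructor
      · rw [ih1, ← hkey]
        constructor
        · rintro ⟨k, h1, h2, h3⟩; exact ⟨k, h1, by omega, h3⟩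
        · rintro ⟨k, h1, h2, h3⟩
          rcases Nat.lt_or_ge k (n+1) with hk | hk
          · exact ⟨k, h1, by omega, h3⟩
          · have : k = n + 1 := by omega
            subst this; exact absurd h3 hnot
      · intro hf; rw [ih2 hf, ← hkey]

theorem pv_mem_stepB (M : Nat) (P : PySem.Set (Nat × Int)) (num : Int) (p : Nat × Int) :
    p ∈ pvStepB M P num ↔ p ∈ P ∨ ∃ q ∈ P, q.1 < M ∧ p = (q.1 + 1, q.2 + num) := by
  unfold pvStepB
  rw [PySem.Set.mem_union, PySem.Set.mem_ofList]
  simp only [List.mem_map, List.mem_filter, decide_eq_true_eq]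
  constructor
  · rintro (h | ⟨q, ⟨hq, hlt⟩, rfl⟩)
    · exact Or.inl h
    · exact Or.inr ⟨q, hq, hlt, rfl⟩
  · rintro (h | ⟨q, hq, hlt, rfl⟩)
    · exact Or.inl h
    · exact Or.inr ⟨q, ⟨hq, hlt⟩, rfl⟩

theorem pv_mem_foldB (M : Nat) : ∀ (rest : List Int) (P : PySem.Set (Nat × Int)) (p : Nat × Int),
    p ∈ P → p ∈ rest.foldl (pvStepB M) P := by
  intro rest
  induction rest with
  | nil => intro P p h; simpa using h
  | cons num rest ih =>
    intro P p h
    exact ih _ _ ((pv_mem_stepB M P num p).mpr (Or.inl h))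

def pvInv (M : Nat) (mat : List (PySem.Set Int)) (P : PySem.Set (Nat × Int)) (i : Nat) : Prop :=
  mat.length = M ∧
  (∀ k, k < M → ∀ s : Int, s ∈ mat.getD k [] ↔ (k, s) ∈ P) ∧
  (∀ p ∈ P, p.1 < M ∧ p.1 ≤ i)

theorem pvInv_step (M : Nat) (mat : List (PySem.Set Int)) (P : PySem.Set (Nat × Int)) (i : Nat)
    (num : Int) (hM : 1 ≤ M) (h : pvInv M mat P i) :
    pvInv M (pvUpdTo num (min (i + 2) M - 1) mat) (pvStepB (M - 1) P num) (i + 1) := by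
  obtain ⟨hlen, hmem, hbnd⟩ := h
  have hn : min (i + 2) M - 1 < mat.length := by omega
  refine ⟨by rw [pvUpdTo_length]; exact hlen, ?_, ?_⟩
  · intro k hk s
    rw [pvUpdTo_getD num _ _ _ hn]
    rw [pv_mem_stepB]
    by_cases hcase : 1 ≤ k ∧ k ≤ min (i + 2) M - 1
    · rw [if_pos hcase, PySem.Set.mem_update]
      rw [hmem k hk]
      simp only [List.mem_map]
      constructor
      · rintro (hp | ⟨s', hs', rfl⟩)
        · exact Or.inl hp
        · have h1 : (k - 1, s') ∈ P := (hmem (k-1) (by omega) s').mp hs'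
          exact Or.inr ⟨(k-1, s'), h1, by omega, by simp; omega⟩
      · rintro (hp | ⟨q, hq, hqM, heq⟩)
        · exact Or.inl hp
        · have hk1 : q.1 = k - 1 := by
            have := congrArg Prod.fst heq; simp at this; omega
          have hs : s = q.2 + num := by
            have := congrArg Prod.snd heq; simpa using this
          refine Or.inr ⟨q.2, ?_, hs.symm⟩
          rw [hmem (k-1) (by omega)]
          rw [← hk1]; exact hq
    · rw [if_neg hcase, hmem k hk]
      constructor
      · exact Or.inl
      · rintro (hp | ⟨q, hq, hqM, heq⟩)
        · exact hp
        · exfalso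
          have hb := hbnd q hq
          have hk1 : k = q.1 + 1 := by
            have := congrArg Prod.fst heq; simpa using this
          omega
  · intro p hp
    rcases (pv_mem_stepB _ _ _ _).mp hp with h1 | ⟨q, hq, hqM, rfl⟩
    · have := hbnd p h1; omega
    · have := hbnd q hq; simp; omega

def pvAnyTgt (target : PySem.Dict Nat Int) (P : PySem.Set (Nat × Int)) : Prop :=
  ∃ k t, target.get? k = some t ∧ (k, t) ∈ P

theorem pvCond_step (target : PySem.Dict Nat Int) (M : Nat) (mat : List (PySem.Set Int))
    (P : PySem.Set (Nat × Int)) (i : Nat) (num : Int) (hM : 1 ≤ M)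
    (hkeys : ∀ k t, target.get? k = some t → 1 ≤ k ∧ k < M)
    (h : pvInv M mat P i) (_hclean : ¬ pvAnyTgt target P) :
    (∃ k, 1 ≤ k ∧ k ≤ min (i + 2) M - 1 ∧ pvCheckOK target k (pvUpdTo num (min (i + 2) M - 1) mat))
      ↔ pvAnyTgt target (pvStepB (M - 1) P num) := by
  obtain ⟨hlen, hmem, hbnd⟩ := pvInv_step M mat P i num hM h
  constructor
  · rintro ⟨k, h1, h2, t, hg, hmemk⟩
    have hk := hkeys k t hg
    exact ⟨k, t, hg, (hmem k hk.2 t).mp hmemk⟩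
  · rintro ⟨k, t, hg, hP⟩
    have hk := hkeys k t hg
    rcases Nat.lt_or_ge (min (i + 2) M - 1) k with hgt | hle
    · exfalso
      have hb := hbnd (k, t) hP
      simp at hb
      omega
    · exact ⟨k, hk.1, hle, t, hg, (hmem k hk.2 t).mpr hP⟩

theorem pvOuter_eq (target : PySem.Dict Nat Int) (M : Nat) (hM : 1 ≤ M)
    (hkeys : ∀ k t, target.get? k = some t → 1 ≤ k ∧ k < M) :
    ∀ (rest : List Int) (i : Nat) (mat : List (PySem.Set Int)) (P : PySem.Set (Nat × Int)),
      pvInv M mat P i → ¬ pvAnyTgt target P →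
      (pvOuterA target M mat i rest = true ↔ pvAnyTgt target (rest.foldl (pvStepB (M - 1)) P)) := by
  intro rest
  induction rest with
  | nil =>
    intro i mat P hinv hclean
    simp only [pvOuterA, List.foldl_nil]
    constructor
    · intro hx; exact absurd hx (by simp)
    · intro hx; exact absurd hx hclean
  | cons num rest ih =>
    intro i mat P hinv hclean
    have hn : min (i + 2) M - 1 < mat.length := by
      rcases hinv with ⟨hlen, _, _⟩; omega
    obtain ⟨is1, is2⟩ := pvInner_spec target num (min (i + 2) M - 1) mat hn
    have hinv' := pvInv_step M mat P i num hM hinv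
    have hcond := pvCond_step target M mat P i num hM hkeys hinv hclean
    rw [List.foldl_cons]
    cases hsnd : (pvInnerA target num mat ((List.range' 1 (min (i + 2) M - 1)).reverse)).2 with
    | true =>
      have houter : pvOuterA target M mat i (num :: rest) = true := by
        simp only [pvOuterA]
        rw [show pvInnerA target num mat ((List.range' 1 (min (i + 2) M - 1)).reverse)
              = ((pvInnerA target num mat ((List.range' 1 (min (i + 2) M - 1)).reverse)).1, true) from
            by rw [← hsnd]]
      rw [houter]
      have hany : pvAnyTgt target (pvStepB (M - 1) P num) := hcond.mp (is1.mp hsnd)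
      obtain ⟨k, t, hg, hp⟩ := hany
      simp only [true_iff]
      exact ⟨k, t, hg, pv_mem_foldB (M - 1) rest _ _ hp⟩
    | false =>
      have houter : pvOuterA target M mat i (num :: rest)
          = pvOuterA target M (pvInnerA target num mat ((List.range' 1 (min (i + 2) M - 1)).reverse)).1 (i + 1) rest := by
        simp only [pvOuterA]
        rw [show pvInnerA target num mat ((List.range' 1 (min (i + 2) M - 1)).reverse)
              = ((pvInnerA target num mat ((List.range' 1 (min (i + 2) M - 1)).reverse)).1, false) from
            by rw [← hsnd]]
      rw [houter, is2 hsnd]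
      have hclean' : ¬ pvAnyTgt target (pvStepB (M - 1) P num) := by
        intro hx
        have := is1.mpr (hcond.mpr hx)
        rw [hsnd] at this; exact absurd this (by simp)
      exact ih (i + 1) _ _ hinv' hclean'

theorem pv_fold_no_insert (cond : Nat → Bool) (v : Nat → Int) :
    ∀ (l : List Nat) (d : PySem.Dict Nat Int), (∀ a ∈ l, cond a = false) →
      l.foldl (fun d (i : Nat) => if cond i then d.insert i (v i) else d) d = d := by
  intro l
  induction l with
  | nil => intro d _; rfl
  | cons a l ih =>
    intro d h
    rw [List.foldl_cons, if_neg (by rw [h a (by simp)]; simp), ih]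
    intro b hb; exact h b (by simp [hb])

-- ---- subset (size, sum) semantics shared by both characterizations ----
def pvReach (xs : List Int) (k : Nat) (s : Int) : Prop :=
  ∃ l : List Int, l.Sublist xs ∧ l.length = k ∧ l.sum = s

theorem pv_reach_nil (k : Nat) (s : Int) : pvReach [] k s ↔ k = 0 ∧ s = 0 := by
  unfold pvReach
  constructor
  · rintro ⟨l, hl, hk, hs⟩
    rw [List.sublist_nil] at hl
    subst hl
    simp at hk hs
    exact ⟨hk.symm, hs.symm⟩
  · rintro ⟨rfl, rfl⟩
    exact ⟨[], List.Sublist.refl _, rfl, rfl⟩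

theorem pv_reach_snoc (xs : List Int) (x : Int) (k : Nat) (s : Int) :
    pvReach (xs ++ [x]) k s ↔ pvReach xs k s ∨ (1 ≤ k ∧ pvReach xs (k - 1) (s - x)) := by
  unfold pvReach
  constructor
  · rintro ⟨l, hl, hk, hs⟩
    rw [List.sublist_append_iff] at hl
    obtain ⟨l1, l2, rfl, h1, h2⟩ := hl
    rcases List.sublist_singleton.mp h2 with rfl | rfl
    · exact Or.inl ⟨l1, h1, by simpa using hk, by simpa using hs⟩
    · simp only [List.length_append, List.length_singleton] at hk
      simp only [List.sum_append, List.sum_singleton] at hs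
      exact Or.inr ⟨by omega, l1, h1, by omega, by omega⟩
  · rintro (⟨l, hl, hk, hs⟩ | ⟨hk1, l, hl, hk, hs⟩)
    · exact ⟨l, hl.trans (List.sublist_append_left _ _), hk, hs⟩
    · refine ⟨l ++ [x], hl.append (List.Sublist.refl [x]), ?_, ?_⟩
      · simp; omega
      · simp; omega

theorem pv_reach_split (L R : List Int) (k : Nat) (s : Int) :
    pvReach (L ++ R) k s
      ↔ ∃ k1 s1 k2 s2, pvReach L k1 s1 ∧ pvReach R k2 s2 ∧ k1 + k2 = k ∧ s1 + s2 = s := by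
  unfold pvReach
  constructor
  · rintro ⟨l, hl, rfl, rfl⟩
    rw [List.sublist_append_iff] at hl
    obtain ⟨l1, l2, rfl, h1, h2⟩ := hl
    exact ⟨l1.length, l1.sum, l2.length, l2.sum,
      ⟨l1, h1, rfl, rfl⟩, ⟨l2, h2, rfl, rfl⟩, by simp, by simp⟩
  · rintro ⟨k1, s1, k2, s2, ⟨l1, h1, rfl, rfl⟩, ⟨l2, h2, rfl, rfl⟩, rfl, rfl⟩
    exact ⟨l1 ++ l2, h1.append h2, by simp, by simp⟩

-- capped fold (A's DP, after pvOuter_eq) computes exactly the reachable pairs with size ≤ M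
theorem pv_mem_foldl_stepB (M : Nat) (xs : List Int) :
    ∀ (k : Nat) (s : Int),
      ((k, s) ∈ xs.foldl (pvStepB M) (PySem.Set.ofList [((0 : Nat), (0 : Int))]))
        ↔ (k ≤ M ∧ pvReach xs k s) := by
  induction xs using List.reverseRecOn with
  | nil =>
    intro k s
    rw [List.foldl_nil, PySem.Set.mem_ofList, pv_reach_nil]
    constructor
    · intro h
      simp at h
      exact ⟨by omega, h⟩
    · rintro ⟨-, rfl, rfl⟩
      simp
  | append_singleton xs x ih =>
    intro k s
    rw [List.foldl_append, List.foldl_cons, List.foldl_nil, pv_mem_stepB, pv_reach_snoc]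
    constructor
    · rintro (h | ⟨q, hq, hlt, heq⟩)
      · obtain ⟨hle, hr⟩ := (ih _ _).mp h
        exact ⟨hle, Or.inl hr⟩
      · obtain ⟨hle, hr⟩ := (ih _ _).mp hq
        have hk : k = q.1 + 1 := by have := congrArg Prod.fst heq; simpa using this
        have hs : s = q.2 + x := by have := congrArg Prod.snd heq; simpa using this
        refine ⟨by omega, Or.inr ⟨by omega, ?_⟩⟩
        have : k - 1 = q.1 := by omega
        rw [this, show s - x = q.2 by omega]
        exact hr
    · rintro ⟨hle, hr | ⟨hk1, hr⟩⟩
      · exact Or.inl ((ih _ _).mpr ⟨hle, hr⟩)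
      · refine Or.inr ⟨(k - 1, s - x), (ih _ _).mpr ⟨by omega, hr⟩, by omega, ?_⟩
        simp
        omega

theorem pv_mem_grow (P : PySem.Set (Nat × Int)) (x : Int) (p : Nat × Int) :
    p ∈ pvGrow P x ↔ p ∈ P ∨ ∃ q ∈ P, p = (q.1 + 1, q.2 + x) := by
  unfold pvGrow
  rw [PySem.Set.mem_union, PySem.Set.mem_ofList]
  simp only [List.mem_map]
  constructor
  · rintro (h | ⟨q, hq, rfl⟩)
    · exact Or.inl h
    · exact Or.inr ⟨q, hq, rfl⟩
  · rintro (h | ⟨q, hq, rfl⟩)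
    · exact Or.inl h
    · exact Or.inr ⟨q, hq, rfl⟩

theorem pv_mem_profiles (xs : List Int) :
    ∀ (k : Nat) (s : Int), ((k, s) ∈ pvProfiles xs) ↔ pvReach xs k s := by
  induction xs using List.reverseRecOn with
  | nil =>
    intro k s
    unfold pvProfiles
    rw [List.foldl_nil, PySem.Set.mem_ofList, pv_reach_nil]
    simp
  | append_singleton xs x ih =>
    intro k s
    have hstep : pvProfiles (xs ++ [x]) = pvGrow (pvProfiles xs) x := by
      unfold pvProfiles
      rw [List.foldl_append, List.foldl_cons, List.foldl_nil]
    rw [hstep, pv_mem_grow, pv_reach_snoc]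
    constructor
    · rintro (h | ⟨q, hq, heq⟩)
      · exact Or.inl ((ih _ _).mp h)
      · have hk : k = q.1 + 1 := by have := congrArg Prod.fst heq; simpa using this
        have hs : s = q.2 + x := by have := congrArg Prod.snd heq; simpa using this
        refine Or.inr ⟨by omega, ?_⟩
        rw [show k - 1 = q.1 by omega, show s - x = q.2 by omega]
        exact (ih _ _).mp hq
    · rintro (h | ⟨hk1, h⟩)
      · exact Or.inl ((ih _ _).mpr h)
      · refine Or.inr ⟨(k - 1, s - x), (ih _ _).mpr h, ?_⟩
        simp
        omega

-- joining the two half tables recovers reachability in the whole list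
theorem pv_join (A : List Int) (h : Nat) (k : Nat) (t : Int) :
    (∃ q : Nat × Int, q ∈ pvProfiles (A.take h) ∧ q.1 ≤ k ∧
        (k - q.1, t - q.2) ∈ pvProfiles (A.drop h))
      ↔ pvReach A k t := by
  constructor
  · rintro ⟨⟨k1, s1⟩, hq, hle, hr⟩
    rw [pv_mem_profiles] at hq hr
    have := (pv_reach_split (A.take h) (A.drop h) k t).mpr
      ⟨k1, s1, k - k1, t - s1, hq, hr, by omega, by omega⟩
    rwa [List.take_append_drop] at this
  · intro hr
    rw [show A = A.take h ++ A.drop h from (List.take_append_drop h A).symm,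
      pv_reach_split] at hr
    obtain ⟨k1, s1, k2, s2, h1, h2, hk, hs⟩ := hr
    refine ⟨(k1, s1), (pv_mem_profiles _ _ _).mpr h1, by omega, ?_⟩
    rw [show k - k1 = k2 by omega, show t - s1 = s2 by omega]
    exact (pv_mem_profiles _ _ _).mpr h2

theorem pv_main (A : List Int) : splitArraySameAverage A = splitArraySameAverage_alt A := by
  unfold splitArraySameAverage splitArraySameAverage_alt
  simp only [Nat.add_sub_cancel]
  set N := A.length with hN
  set S := A.sum with hS
  set tgt : PySem.Dict Nat Int :=
    (List.range' 1 (N / 2)).foldl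
      (fun d (i : Nat) => if PySem.Int.mod (S * (i : Int)) (N : Int) == 0
                  then d.insert i (PySem.Int.floordiv (S * (i : Int)) (N : Int)) else d)
      PySem.Dict.empty with htgt
  set targets : List (Nat × Int) :=
    ((List.range' 1 (N / 2)).filter (fun (k : Nat) => PySem.Int.mod (S * (k : Int)) (N : Int) == 0)).map
      (fun (k : Nat) => (k, PySem.Int.floordiv (S * (k : Int)) (N : Int))) with htargets
  have hchar : ∀ k, tgt.get? k =
      if k ∈ List.range' 1 (N / 2) ∧ (PySem.Int.mod (S * (k : Int)) (N : Int) == 0) = true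
      then some (PySem.Int.floordiv (S * (k : Int)) (N : Int)) else none := by
    intro k
    rw [htgt, pv_fold_cond_insert_get?
      (fun i => PySem.Int.mod (S * (i : Int)) (N : Int) == 0)
      (fun i => PySem.Int.floordiv (S * (i : Int)) (N : Int))]
    split_ifs <;> simp [PySem.Dict.get?_empty]
  have hkeys : ∀ k t, tgt.get? k = some t → 1 ≤ k ∧ k < N / 2 + 1 := by
    intro k t hg
    rw [hchar] at hg
    split_ifs at hg with hcond
    have := hcond.1
    rw [List.mem_range'_1] at this
    omega
  have htmem : ∀ p : Nat × Int, p ∈ targets ↔ tgt.get? p.1 = some p.2 := by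
    rintro ⟨k, t⟩
    rw [htargets]
    simp only [List.mem_map, List.mem_filter]
    constructor
    · rintro ⟨k', ⟨hk', hc⟩, heq⟩
      obtain ⟨h1, h2⟩ := Prod.mk.injEq .. ▸ heq
      subst h1
      rw [hchar, if_pos ⟨hk', hc⟩, h2]
    · intro hg
      rw [hchar] at hg
      split_ifs at hg with hcond
      refine ⟨k, ⟨hcond.1, hcond.2⟩, ?_⟩
      have : PySem.Int.floordiv (S * (k : Int)) (N : Int) = t := by injection hg
      rw [this]
  have hempty_iff : tgt.size = 0 ↔ targets = [] := by
    constructor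
    · intro hsz
      have hitems : tgt.items = [] := List.length_eq_zero_iff.mp hsz
      have hemp : tgt = PySem.Dict.empty := by
        apply PySem.Dict.ext; rw [hitems]; rfl
      rw [List.eq_nil_iff_forall_not_mem]
      intro p hp
      have := (htmem p).mp hp
      rw [hemp, PySem.Dict.get?_empty] at this
      exact absurd this (by simp)
    · intro hnil
      have hcond : ∀ a ∈ List.range' 1 (N / 2),
          (fun (i : Nat) => PySem.Int.mod (S * (i : Int)) (N : Int) == 0) a = false := by
        intro a ha
        by_contra hc
        have hc' : (PySem.Int.mod (S * (a : Int)) (N : Int) == 0) = true := by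
          simpa using hc
        have : (a, PySem.Int.floordiv (S * (a : Int)) (N : Int)) ∈ targets := by
          rw [htargets]
          simp only [List.mem_map, List.mem_filter]
          exact ⟨a, ⟨ha, hc'⟩, rfl⟩
        rw [hnil] at this
        exact absurd this (by simp)
      rw [htgt, pv_fold_no_insert _ _ _ _ hcond]
      rfl
  by_cases hsz : tgt.size = 0
  · rw [if_pos (by simpa using hsz), if_pos (hempty_iff.mp hsz)]
  · rw [if_neg (by simpa using hsz), if_neg (fun h => hsz (hempty_iff.mpr h))]
    set mat0 : List (PySem.Set Int) := (List.range (N / 2 + 1)).map (fun _ => ([] : PySem.Set Int)) with hmat0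
    set mat1 := mat0.set 0 (PySem.Set.add (mat0.getD 0 []) 0) with hmat1
    have hlen0 : mat0.length = N / 2 + 1 := by simp [hmat0]
    have hgm1 : ∀ k, mat1.getD k [] = if k = 0 then [(0 : Int)] else mat0.getD k [] := by
      intro k
      rw [hmat1, pv_getD_set]
      by_cases hk : k = 0
      · simp [hk, hmat0]
      · simp [hk]
    have hinv : pvInv (N / 2 + 1) mat1 (PySem.Set.ofList [((0 : Nat), (0 : Int))]) 0 := by
      refine ⟨by simp [hmat1, hlen0], ?_, ?_⟩
      · intro k hk s
        rw [hgm1]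
        by_cases hk0 : k = 0
        · subst hk0; simp [PySem.Set.mem_ofList]
        · rw [if_neg hk0]
          have : mat0.getD k [] = [] := by
            simp [hmat0, List.getD_eq_getElem?_getD]
          rw [this]
          simp [PySem.Set.mem_ofList, hk0]
      · intro p hp
        rw [PySem.Set.mem_ofList] at hp
        simp at hp
        subst hp
        simp
    have hclean : ¬ pvAnyTgt tgt (PySem.Set.ofList [((0 : Nat), (0 : Int))]) := by
      rintro ⟨k, t, hg, hp⟩
      rw [PySem.Set.mem_ofList] at hp
      simp at hp
      have := hkeys k t hg
      omega
    have houter := pvOuter_eq tgt (N / 2 + 1) (by omega) hkeys A 0 mat1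
      (PySem.Set.ofList [((0 : Nat), (0 : Int))]) hinv hclean
    simp only [Nat.add_sub_cancel] at houter
    -- A's result iff some required pair is reachable
    have hAiff : (pvOuterA tgt (N / 2 + 1) mat1 0 A = true)
        ↔ ∃ p : Nat × Int, p ∈ targets ∧ pvReach A p.1 p.2 := by
      rw [houter]
      constructor
      · rintro ⟨k, t, hg, hp⟩
        refine ⟨(k, t), (htmem (k, t)).mpr hg, ?_⟩
        exact ((pv_mem_foldl_stepB (N / 2) A k t).mp hp).2
      · rintro ⟨⟨k, t⟩, hmemT, hr⟩
        have hg := (htmem (k, t)).mp hmemT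
        have hk := hkeys k t hg
        exact ⟨k, t, hg, (pv_mem_foldl_stepB (N / 2) A k t).mpr ⟨by omega, hr⟩⟩
    -- B's result iff some required pair is reachable
    have hslice1 : PySem.List.slice A none (some ((N / 2 : Nat) : Int)) = A.take (N / 2) :=
      PySem.List.slice_to_natCast A (N / 2)
    have hslice2 : PySem.List.slice A (some ((N / 2 : Nat) : Int)) none = A.drop (N / 2) :=
      PySem.List.slice_from_natCast A (N / 2)
    have hBiff : (targets.any (fun p => (pvProfiles (PySem.List.slice A none (some ((N / 2 : Nat) : Int)))).any
          (fun q => decide (q.1 ≤ p.1) &&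
            PySem.Set.contains (pvProfiles (PySem.List.slice A (some ((N / 2 : Nat) : Int)) none))
              (p.1 - q.1, p.2 - q.2))) = true)
        ↔ ∃ p : Nat × Int, p ∈ targets ∧ pvReach A p.1 p.2 := by
      rw [hslice1, hslice2, List.any_eq_true]
      constructor
      · rintro ⟨p, hp, hin⟩
        rw [List.any_eq_true] at hin
        obtain ⟨q, hq, hqc⟩ := hin
        rw [Bool.and_eq_true, decide_eq_true_eq, PySem.Set.contains_iff] at hqc
        exact ⟨p, hp, (pv_join A (N / 2) p.1 p.2).mp ⟨q, hq, hqc.1, hqc.2⟩⟩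
      · rintro ⟨p, hp, hr⟩
        obtain ⟨q, hq, hle, hin⟩ := (pv_join A (N / 2) p.1 p.2).mpr hr
        refine ⟨p, hp, ?_⟩
        rw [List.any_eq_true]
        exact ⟨q, hq, by rw [Bool.and_eq_true, decide_eq_true_eq, PySem.Set.contains_iff]; exact ⟨hle, hin⟩⟩
    cases hA : pvOuterA tgt (N / 2 + 1) mat1 0 A with
    | true =>
      symm
      exact hBiff.mpr (hAiff.mp hA)
    | false =>
      symm
      rw [← Bool.not_eq_true]
      intro hb
      have := hAiff.mpr (hBiff.mp hb)
      rw [hA] at this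
      exact absurd this (by simp)

-- ===== VERDICT (by name: the statement is the Claim_ definition above) =====
theorem splitArraySameAverage_spec : Claim_equal_splitArraySameAverage := by
  intro A _
  unfold Spec_splitArraySameAverage
  exact pv_main A
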